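-- pv_equiv track=rewrite | github.com/Geen-19/MometumFinder | backend/analysis/signals.py | get_signal_summary
-- ===== SOURCE A (Python) =====
-- from typing import List, Dict, Optional
--
-- class SignalType:
--     STRONG_BUY = "Strong Buy"
--     BUY = "Buy"
--     HOLD = "Hold"
--     SELL = "Sell"
--     AVOID = "Avoid"
--
-- def get_signal_summary(signals: List[Dict]) -> Dict:
--     """
--     Get summary counts of signals by type.
--     """
--     summary = {
--         SignalType.STRONG_BUY: 0,
--         SignalType.BUY: 0,
--         SignalType.HOLD: 0,
--         SignalType.SELL: 0,
--         SignalType.AVOID: 0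
--     }
--
--     for signal in signals:
--         signal_type = signal.get('signal_type')
--         if signal_type in summary:
--             summary[signal_type] += 1
--
--     return summary
-- ===== SOURCE B (Python) =====
-- def get_signal_summary(signals):
--     """
--     Get summary counts of signals by type.
--     """
--     return {
--         t: sum(1 for s in signals if s.get('signal_type') == t)
--         for t in ("Strong Buy", "Buy", "Hold", "Sell", "Avoid")
--     }
-- ===== Notes on version B (the rewrite author's own statement) =====
-- stated objective: alternative
-- what changed: Replaces A's single accumulating pass over a mutable count dict with five independent per-type counting scans of the signals list, one per fixed signal type.
import Mathlib
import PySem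

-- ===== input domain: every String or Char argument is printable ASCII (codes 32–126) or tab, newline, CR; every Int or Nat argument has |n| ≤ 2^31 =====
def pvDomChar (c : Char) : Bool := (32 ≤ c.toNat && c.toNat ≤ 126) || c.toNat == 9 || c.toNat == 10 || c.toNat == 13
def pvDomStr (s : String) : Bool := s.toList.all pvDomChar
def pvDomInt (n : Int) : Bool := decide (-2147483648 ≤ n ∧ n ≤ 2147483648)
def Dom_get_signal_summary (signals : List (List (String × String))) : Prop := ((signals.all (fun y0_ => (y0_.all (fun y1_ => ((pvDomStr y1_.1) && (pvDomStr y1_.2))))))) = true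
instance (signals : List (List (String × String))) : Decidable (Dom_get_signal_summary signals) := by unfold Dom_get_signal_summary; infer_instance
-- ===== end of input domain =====

-- B is an alternative decomposition: five independent per-type counting scans instead of A's single accumulating pass over a mutable dict.

-- ===== PORT A =====
-- step of A's loop: look up 'signal_type', increment its counter if it is a key of summary
def pvStepA (summary : PySem.Dict String Int) (signal : List (String × String)) : PySem.Dict String Int :=
  match (PySem.Dict.mk signal).get? "signal_type" with
  | none => summary
  | some t => if summary.contains t then summary.modify t 0 (· + 1) else summary

def get_signal_summary (signals : List (List (String × String))) : List (String × Int) :=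
  (signals.foldl pvStepA
    (PySem.Dict.mk [("Strong Buy", 0), ("Buy", 0), ("Hold", 0), ("Sell", 0), ("Avoid", 0)])).items

-- ===== PORT B =====
-- sum(1 for s in signals if s.get('signal_type') == t)
def pvCountB (signals : List (List (String × String))) (t : String) : Int :=
  signals.foldl (fun acc s => if (PySem.Dict.mk s).get? "signal_type" == some t then acc + 1 else acc) 0

def get_signal_summary_alt (signals : List (List (String × String))) : List (String × Int) :=
  ["Strong Buy", "Buy", "Hold", "Sell", "Avoid"].map (fun t => (t, pvCountB signals t))

-- ===== PRECONDITION & SPEC =====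
def Spec_get_signal_summary (signals : List (List (String × String))) (out : List (String × Int)) : Prop := out = get_signal_summary_alt signals
instance (signals : List (List (String × String))) (out : List (String × Int)) : Decidable (Spec_get_signal_summary signals out) := by unfold Spec_get_signal_summary; infer_instance

-- ===== CLAIM (what is proved, stated in full; the proofs are below) =====
def Claim_equal_get_signal_summary : Prop := ∀ (signals : List (List (String × String))), Dom_get_signal_summary signals → Spec_get_signal_summary signals (get_signal_summary signals)

-- ===== LEMMAS AND PROOFS =====

def pvCnt (signals : List (List (String × String))) (t : String) : Int :=
  (signals.countP (fun s => (PySem.Dict.mk s).get? "signal_type" == some t) : Int)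

lemma pvFoldA_items (signals : List (List (String × String))) :
    ∀ (a b c d e : Int),
    (signals.foldl pvStepA
      (PySem.Dict.mk [("Strong Buy", a), ("Buy", b), ("Hold", c), ("Sell", d), ("Avoid", e)])).items
    = [("Strong Buy", a + pvCnt signals "Strong Buy"),
       ("Buy", b + pvCnt signals "Buy"),
       ("Hold", c + pvCnt signals "Hold"),
       ("Sell", d + pvCnt signals "Sell"),
       ("Avoid", e + pvCnt signals "Avoid")] := by
  induction signals with
  | nil => intro a b c d e; simp [pvCnt]
  | cons s rest ih =>
    intro a b c d e
    have hcnt : ∀ t, pvCnt (s :: rest) t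
        = (if (PySem.Dict.mk s).get? "signal_type" == some t then 1 else 0) + pvCnt rest t := by
      intro t
      simp only [pvCnt, List.countP_cons]
      split <;> simp_all <;> ring
    simp only [List.foldl_cons]
    rcases h : (PySem.Dict.mk s).get? "signal_type" with _ | t
    · have hs : pvStepA (PySem.Dict.mk [("Strong Buy", a), ("Buy", b), ("Hold", c), ("Sell", d), ("Avoid", e)]) s
          = PySem.Dict.mk [("Strong Buy", a), ("Buy", b), ("Hold", c), ("Sell", d), ("Avoid", e)] := by
        simp [pvStepA, h]
      rw [hs, ih]
      simp [hcnt, h]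
    · by_cases h0 : t = "Strong Buy"
      · subst h0
        have hs : pvStepA (PySem.Dict.mk [("Strong Buy", a), ("Buy", b), ("Hold", c), ("Sell", d), ("Avoid", e)]) s
            = PySem.Dict.mk [("Strong Buy", a + 1), ("Buy", b), ("Hold", c), ("Sell", d), ("Avoid", e)] := by
          simp only [pvStepA, h]
          simp [PySem.Dict.contains, PySem.Dict.modify, PySem.Dict.insert,
                PySem.Dict.getD, PySem.Dict.get?]
        rw [hs, ih]
        simp [hcnt, h, add_assoc]
      by_cases h1 : t = "Buy"
      · subst h1
        have hs : pvStepA (PySem.Dict.mk [("Strong Buy", a), ("Buy", b), ("Hold", c), ("Sell", d), ("Avoid", e)]) s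
            = PySem.Dict.mk [("Strong Buy", a), ("Buy", b + 1), ("Hold", c), ("Sell", d), ("Avoid", e)] := by
          simp only [pvStepA, h]
          simp [PySem.Dict.contains, PySem.Dict.modify, PySem.Dict.insert,
                PySem.Dict.getD, PySem.Dict.get?]
        rw [hs, ih]
        simp [hcnt, h, add_assoc]
      by_cases h2 : t = "Hold"
      · subst h2
        have hs : pvStepA (PySem.Dict.mk [("Strong Buy", a), ("Buy", b), ("Hold", c), ("Sell", d), ("Avoid", e)]) s
            = PySem.Dict.mk [("Strong Buy", a), ("Buy", b), ("Hold", c + 1), ("Sell", d), ("Avoid", e)] := by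
          simp only [pvStepA, h]
          simp [PySem.Dict.contains, PySem.Dict.modify, PySem.Dict.insert,
                PySem.Dict.getD, PySem.Dict.get?]
        rw [hs, ih]
        simp [hcnt, h, add_assoc]
      by_cases h3 : t = "Sell"
      · subst h3
        have hs : pvStepA (PySem.Dict.mk [("Strong Buy", a), ("Buy", b), ("Hold", c), ("Sell", d), ("Avoid", e)]) s
            = PySem.Dict.mk [("Strong Buy", a), ("Buy", b), ("Hold", c), ("Sell", d + 1), ("Avoid", e)] := by
          simp only [pvStepA, h]
          simp [PySem.Dict.contains, PySem.Dict.modify, PySem.Dict.insert,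
                PySem.Dict.getD, PySem.Dict.get?]
        rw [hs, ih]
        simp [hcnt, h, add_assoc]
      by_cases h4 : t = "Avoid"
      · subst h4
        have hs : pvStepA (PySem.Dict.mk [("Strong Buy", a), ("Buy", b), ("Hold", c), ("Sell", d), ("Avoid", e)]) s
            = PySem.Dict.mk [("Strong Buy", a), ("Buy", b), ("Hold", c), ("Sell", d), ("Avoid", e + 1)] := by
          simp only [pvStepA, h]
          simp [PySem.Dict.contains, PySem.Dict.modify, PySem.Dict.insert,
                PySem.Dict.getD, PySem.Dict.get?]
        rw [hs, ih]
        simp [hcnt, h, add_assoc]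
      have hs : pvStepA (PySem.Dict.mk [("Strong Buy", a), ("Buy", b), ("Hold", c), ("Sell", d), ("Avoid", e)]) s
          = PySem.Dict.mk [("Strong Buy", a), ("Buy", b), ("Hold", c), ("Sell", d), ("Avoid", e)] := by
        simp only [pvStepA, h]
        simp [PySem.Dict.contains]
        intro hc
        rcases hc with h' | h' | h' | h' | h' <;> simp_all
      rw [hs, ih]
      simp [hcnt, h, h0, h1, h2, h3, h4]

lemma pvCountB_eq (signals : List (List (String × String))) (t : String) :
    pvCountB signals t = pvCnt signals t := by
  simpa [pvCountB, pvCnt] using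
    PySem.List.foldl_if_add_one (fun s => (PySem.Dict.mk s).get? "signal_type" == some t) signals 0

-- ===== VERDICT (by name: the statement is the Claim_ definition above) =====
theorem get_signal_summary_spec : Claim_equal_get_signal_summary := by
  intro signals _
  show _ = _
  unfold get_signal_summary get_signal_summary_alt
  rw [pvFoldA_items]
  simp [pvCountB_eq]
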